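-- pv_equiv track=rewrite | github.com/BertinAm/python | 50DAYSOFCODECHALLENGE/Day28/Day28.py | index_position
-- ===== SOURCE A (Python) =====
-- def index_position(word):
--     c = 0
--     empty = []
--     for b in word:
--         if b.islower():
--             c += 1
--             empty.append(c)
--     return empty
-- ===== SOURCE B (Python) =====
-- def index_position(word):
--     def solve(chars):
--         if len(chars) <= 1:
--             return [1] if chars and chars[0].islower() else []
--         mid = len(chars) // 2
--         left = solve(chars[:mid])
--         right = solve(chars[mid:])
--         k = len(left)
--         return left + [x + k for x in right]
--     return solve(list(word))
-- ===== Notes on version B (the rewrite author's own statement) =====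
-- stated objective: alternative
-- what changed: B is divide-and-conquer with no counter: it splits the word at the midpoint, solves each half independently, and merges by shifting the right half's positions up by the length of the left result; A scans left to right with a running counter appended inside the loop.
import Mathlib
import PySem

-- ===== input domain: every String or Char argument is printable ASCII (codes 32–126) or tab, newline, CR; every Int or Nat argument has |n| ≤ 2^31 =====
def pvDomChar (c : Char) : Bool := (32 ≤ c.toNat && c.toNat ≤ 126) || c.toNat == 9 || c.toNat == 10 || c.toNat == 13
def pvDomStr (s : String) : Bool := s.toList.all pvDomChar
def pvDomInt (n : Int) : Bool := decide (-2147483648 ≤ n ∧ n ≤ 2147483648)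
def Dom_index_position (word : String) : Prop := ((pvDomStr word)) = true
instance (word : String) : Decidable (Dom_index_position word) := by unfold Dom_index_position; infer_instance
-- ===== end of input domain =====

-- B replaces the counter loop by divide-and-conquer: solve each half, shift the right half by the left result's length; objective: alternative.

-- ===== PORT A =====
-- loop over the characters carrying the counter c and the accumulated list
def index_position (word : String) : List Int :=
  (word.toList.foldl
    (fun (st : Int × List Int) b =>
      if PySem.Str.islower b then (st.1 + 1, st.2 ++ [st.1 + 1]) else st)
    (0, [])).2

-- ===== PORT B =====
-- divide and conquer: split at the midpoint, solve both halves, shift the right half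
def ipSolve (l : List Char) : List Int :=
  if _h : l.length ≤ 1 then
    match l with
    | [] => []
    | b :: _ => if PySem.Str.islower b then [1] else []
  else
    let mid := l.length / 2
    let left := ipSolve (l.take mid)
    let right := ipSolve (l.drop mid)
    left ++ right.map (fun x => x + (left.length : Int))
termination_by l.length
decreasing_by
  · simp only [List.length_take]; omega
  · simp only [List.length_drop]; omega

def index_position_alt (word : String) : List Int := ipSolve word.toList

-- ===== PRECONDITION & SPEC =====
def Spec_index_position (word : String) (out : List Int) : Prop := out = index_position_alt word
instance (word : String) (out : List Int) : Decidable (Spec_index_position word out) := by unfold Spec_index_position; infer_instance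

-- ===== CLAIM (what is proved, stated in full; the proofs are below) =====
def Claim_equal_index_position : Prop := ∀ (word : String), Dom_index_position word → Spec_index_position word (index_position word)

-- ===== LEMMAS AND PROOFS =====

-- number of lowercase characters, and the list [1, …, n] both programs produce
def lowCount (l : List Char) : Nat := l.countP (fun b => PySem.Str.islower b)
def posList (n : Nat) : List Int := (List.range n).map (fun i => (i : Int) + 1)

theorem posList_succ (n : Nat) : posList (n + 1) = posList n ++ [(n : Int) + 1] := by
  simp [posList, List.range_succ]

theorem posList_add (a b : Nat) :
    posList (a + b) = posList a ++ (posList b).map (fun x => x + (a : Int)) := by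
  induction b with
  | zero => simp [posList]
  | succ b ih =>
    rw [show a + (b + 1) = (a + b) + 1 by omega, posList_succ, ih, posList_succ,
      List.map_append, ← List.append_assoc]
    simp only [List.map_cons, List.map_nil]
    congr 2
    push_cast
    ring

theorem posList_length (n : Nat) : (posList n).length = n := by simp [posList]

-- B computes [1, …, lowCount l]
theorem ipSolve_eq (l : List Char) : ipSolve l = posList (lowCount l) := by
  rw [ipSolve]
  split
  · next h =>
    match l with
    | [] => simp [lowCount, posList]
    | [b] =>
      by_cases hb : PySem.Str.islower b = true <;>
        simp [lowCount, posList, List.countP, List.countP.go, hb, List.range_succ]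
    | _ :: _ :: _ => simp at h
  · next h =>
    show ipSolve (l.take (l.length / 2)) ++
        (ipSolve (l.drop (l.length / 2))).map
          (fun x => x + ((ipSolve (l.take (l.length / 2))).length : Int))
      = posList (lowCount l)
    rw [ipSolve_eq (l.take (l.length / 2)), ipSolve_eq (l.drop (l.length / 2))]
    have hsplit : lowCount (l.take (l.length / 2)) + lowCount (l.drop (l.length / 2))
        = lowCount l := by
      unfold lowCount
      rw [← List.countP_append, List.take_append_drop]
    rw [posList_length, ← posList_add, hsplit]
termination_by l.length
decreasing_by
  · simp only [List.length_take]; omega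
  · simp only [List.length_drop]; omega

-- A's loop invariant: with counter c and accumulator acc it yields acc ++ [1, …, lowCount l] shifted by c
theorem ip_loop_inv (l : List Char) (c : Int) (acc : List Int) :
    (l.foldl
      (fun (st : Int × List Int) b =>
        if PySem.Str.islower b then (st.1 + 1, st.2 ++ [st.1 + 1]) else st)
      (c, acc)).2 = acc ++ (posList (lowCount l)).map (fun x => x + c) := by
  induction l generalizing c acc with
  | nil => simp [lowCount, posList]
  | cons b rest ih =>
    simp only [List.foldl_cons]
    by_cases h : PySem.Str.islower b = true
    · rw [if_pos h, ih]
      have hcnt : lowCount (b :: rest) = 1 + lowCount rest := by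
        unfold lowCount; simp [h]; omega
      have h1 : (posList 1).map (fun x => x + c) = [c + 1] := by
        simp [posList, List.range_one]; ring
      rw [hcnt, posList_add, List.map_append, List.map_map, h1, List.append_assoc]
      congr 2
      apply List.map_congr_left
      intro x _
      simp only [Function.comp]
      ring
    · rw [if_neg h, ih]
      have hcnt : lowCount (b :: rest) = lowCount rest := by
        unfold lowCount; simp [h]
      rw [hcnt]

theorem index_position_spec : Claim_equal_index_position := by
  intro word _
  unfold Spec_index_position index_position index_position_alt
  rw [ip_loop_inv, ipSolve_eq]
  simp
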